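-- pv_equiv track=rewrite | github.com/pradeepbkarma/human_paralogs_project | src/active_site_predictions.py | get_msa_index
-- ===== SOURCE A (Python) =====
-- def get_msa_index(ref_seq: str, ref_seq_pos:list[int])-> list[int]:
--     ref_pos_set = set(ref_seq_pos)
--     msa_position = []
--     seq_index = 0 # 1- based after increment
--
--     for msa_index, aa in enumerate(ref_seq, start=1):
--         if aa != '-':
--             seq_index +=1
--             if seq_index in ref_pos_set:
--                 msa_position.append(msa_index)
--
--     return msa_position
-- ===== SOURCE B (Python) =====
-- def get_msa_index(ref_seq: str, ref_seq_pos: list[int]) -> list[int]: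
--     # Inverted decomposition: build a position->column table from the sequence,
--     # then look the requested positions up in sorted order.
--     pos2col = {}
--     seq_index = 0
--     for msa_index, aa in enumerate(ref_seq, start=1):
--         if aa != '-':
--             seq_index += 1
--             pos2col[seq_index] = msa_index
--     result = []
--     for pos in sorted(set(ref_seq_pos)):
--         if pos in pos2col:
--             result.append(pos2col[pos])
--     return result
-- ===== Notes on version B (the rewrite author's own statement) =====
-- stated objective: alternative
-- what changed: A scans the alignment once testing each sequence position against a set of requested positions; B instead builds a full position-to-column table from the alignment and then iterates the requested positions in sorted deduplicated order, looking each up in the table (output order comes from sorting, not from the alignment scan).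
import Mathlib
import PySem

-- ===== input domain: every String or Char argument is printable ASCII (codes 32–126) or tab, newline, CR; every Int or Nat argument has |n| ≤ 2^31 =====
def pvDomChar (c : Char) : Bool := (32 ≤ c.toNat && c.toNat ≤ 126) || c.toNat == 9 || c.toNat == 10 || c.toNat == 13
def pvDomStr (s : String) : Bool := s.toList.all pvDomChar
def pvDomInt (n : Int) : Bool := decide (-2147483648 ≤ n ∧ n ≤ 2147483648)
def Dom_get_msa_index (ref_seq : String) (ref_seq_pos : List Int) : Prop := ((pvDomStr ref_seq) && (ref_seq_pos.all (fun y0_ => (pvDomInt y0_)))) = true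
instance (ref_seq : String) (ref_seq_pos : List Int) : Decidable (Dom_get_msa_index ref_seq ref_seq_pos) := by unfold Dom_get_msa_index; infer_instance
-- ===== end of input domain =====

-- B inverts the decomposition: instead of scanning the alignment and testing each sequence
-- position against a set, it builds a position-to-column table from the alignment and looks up
-- the requested positions in sorted deduplicated order (alternative decomposition, same cost).


-- ===== PORT A =====
def get_msa_index (ref_seq : String) (ref_seq_pos : List Int) : List Int :=
  let ref_pos_set : PySem.Set Int := PySem.Set.ofList ref_seq_pos
  let r :=
    (PySem.List.enumerate ref_seq.toList 1).foldl
      (fun (st : Int × List Int) p =>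
        if p.2 ≠ '-' then
          let seq_index := st.1 + 1
          if PySem.Set.contains ref_pos_set seq_index then (seq_index, st.2 ++ [p.1])
          else (seq_index, st.2)
        else st)
      (0, [])
  r.2

-- ===== PORT B =====
def get_msa_index_alt (ref_seq : String) (ref_seq_pos : List Int) : List Int :=
  let st :=
    (PySem.List.enumerate ref_seq.toList 1).foldl
      (fun (st : PySem.Dict Int Int × Int) p =>
        if p.2 ≠ '-' then
          let seq_index := st.2 + 1
          (st.1.insert seq_index p.1, seq_index)
        else st)
      (PySem.Dict.empty, 0)
  let pos2col := st.1
  (PySem.List.sorted (PySem.Set.ofList ref_seq_pos) (fun x => x) false).foldl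
    (fun acc pos =>
      match pos2col.get? pos with
      | some c => acc ++ [c]
      | none => acc)
    []

-- ===== PRECONDITION & SPEC =====
def Spec_get_msa_index (ref_seq : String) (ref_seq_pos : List Int) (out : List Int) : Prop := out = get_msa_index_alt ref_seq ref_seq_pos
instance (ref_seq : String) (ref_seq_pos : List Int) (out : List Int) : Decidable (Spec_get_msa_index ref_seq ref_seq_pos out) := by unfold Spec_get_msa_index; infer_instance

-- ===== CLAIM (what is proved, stated in full; the proofs are below) =====
def Claim_equal_get_msa_index : Prop := ∀ (ref_seq : String) (ref_seq_pos : List Int), Dom_get_msa_index ref_seq ref_seq_pos → Spec_get_msa_index ref_seq ref_seq_pos (get_msa_index ref_seq ref_seq_pos)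

-- ===== LEMMAS AND PROOFS =====

/-- Recursive model of A's scan: the MSA columns of the non-gap positions whose
sequence index lies in `L`, scanning chars with MSA counter `m`, seq counter `s`. -/
def gaModel (L : List Int) : List Char → Int → Int → List Int
  | [], _, _ => []
  | c :: t, m, s =>
    if c ≠ '-' then
      if (s + 1) ∈ L then m :: gaModel L t (m + 1) (s + 1) else gaModel L t (m + 1) (s + 1)
    else gaModel L t (m + 1) s

/-- Recursive model of B's table, as an association list in insertion order. -/
def bdModel : List Char → Int → Int → List (Int × Int)
  | [], _, _ => []
  | c :: t, m, s =>
    if c ≠ '-' then (s + 1, m) :: bdModel t (m + 1) (s + 1) else bdModel t (m + 1) s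

/-- First-match lookup in an association list. -/
def lk : List (Int × Int) → Int → Option Int
  | [], _ => none
  | (k, v) :: t, p => if p = k then some v else lk t p

theorem lk_bdModel_of_le (chars : List Char) (m s p : Int) (hp : p ≤ s) :
    lk (bdModel chars m s) p = none := by
  induction chars generalizing m s with
  | nil => rfl
  | cons c t ih =>
    simp only [bdModel]
    split
    · simp only [lk]
      rw [if_neg (by omega)]
      exact ih (m + 1) (s + 1) (by omega)
    · exact ih (m + 1) s hp

theorem foldA_eq_gaModel (set' : PySem.Set Int) (L : List Int)
    (hmem : ∀ p : Int, PySem.Set.contains set' p = true ↔ p ∈ L)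
    (chars : List Char) (m s : Int) (acc : List Int) :
    ((PySem.List.enumerate chars m).foldl
      (fun (st : Int × List Int) p =>
        if p.2 ≠ '-' then
          let seq_index := st.1 + 1
          if PySem.Set.contains set' seq_index then (seq_index, st.2 ++ [p.1])
          else (seq_index, st.2)
        else st)
      (s, acc)).2 = acc ++ gaModel L chars m s := by
  induction chars generalizing m s acc with
  | nil => simp [PySem.List.enumerate_nil, gaModel]
  | cons c t ih =>
    rw [PySem.List.enumerate_cons]
    simp only [List.foldl_cons, gaModel]
    by_cases hc : c ≠ '-'
    · rw [if_pos hc, if_pos hc]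
      by_cases hin : (s + 1) ∈ L
      · rw [if_pos ((hmem (s + 1)).mpr hin), if_pos hin]
        rw [ih (m + 1) (s + 1) (acc ++ [m])]
        simp
      · rw [if_neg (fun h => hin ((hmem (s + 1)).mp h)), if_neg hin]
        exact ih (m + 1) (s + 1) acc
    · rw [if_neg hc, if_neg hc]
      exact ih (m + 1) s acc

theorem foldB_get?_eq_lk (chars : List Char) (m s : Int) (d : PySem.Dict Int Int) (p : Int) :
    ((PySem.List.enumerate chars m).foldl
      (fun (st : PySem.Dict Int Int × Int) q =>
        if q.2 ≠ '-' then
          let seq_index := st.2 + 1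
          (st.1.insert seq_index q.1, seq_index)
        else st)
      (d, s)).1.get? p =
    (match lk (bdModel chars m s) p with
     | some v => some v
     | none => d.get? p) := by
  induction chars generalizing m s d with
  | nil => simp [PySem.List.enumerate_nil, bdModel, lk]
  | cons c t ih =>
    rw [PySem.List.enumerate_cons]
    simp only [List.foldl_cons, bdModel]
    by_cases hc : c ≠ '-'
    · rw [if_pos hc, if_pos hc]
      rw [ih (m + 1) (s + 1) (d.insert (s + 1) m)]
      simp only [lk]
      by_cases hp : p = s + 1
      · rw [if_pos hp, lk_bdModel_of_le t (m + 1) (s + 1) p (by omega)]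
        subst hp
        simp [PySem.Dict.get?_insert_self]
      · rw [if_neg hp]
        cases lk (bdModel t (m + 1) (s + 1)) p with
        | some v => rfl
        | none => simp [PySem.Dict.get?_insert_of_ne d m hp]
    · rw [if_neg hc, if_neg hc]
      exact ih (m + 1) s d

theorem foldB_collect (d : PySem.Dict Int Int) (L : List Int) (acc : List Int) :
    L.foldl
      (fun acc pos =>
        match d.get? pos with
        | some c => acc ++ [c]
        | none => acc)
      acc = acc ++ L.filterMap d.get? := by
  induction L generalizing acc with
  | nil => simp
  | cons p t ih =>
    simp only [List.foldl_cons, List.filterMap_cons]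
    cases h : d.get? p with
    | some v => rw [ih (acc ++ [v])]; simp
    | none => rw [ih acc]

/-- Inserting a fresh smallest key in front: on a strictly increasing list the hit (if any)
comes first. -/
theorem filterMap_cons_key (L : List Int) (f : Int → Option Int) (k v : Int)
    (hL : L.Pairwise (· < ·)) (hf : ∀ p ≤ k, f p = none) :
    L.filterMap (fun p => if p = k then some v else f p) =
      (if k ∈ L then [v] else []) ++ L.filterMap f := by
  induction L with
  | nil => simp
  | cons a t ih =>
    have hpw := (List.pairwise_cons.mp hL).2
    have hat := (List.pairwise_cons.mp hL).1
    by_cases hak : a = k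
    · subst hak
      have hnt : a ∉ t := fun h => lt_irrefl a (hat a h)
      simp only [List.filterMap_cons, List.mem_cons, true_or, if_pos,
        hf a le_rfl]
      rw [List.filterMap_congr (fun q hq => if_neg (fun h : q = a => hnt (h ▸ hq)))]
      rfl
    · rcases lt_or_gt_of_ne hak with hlt | hgt
      · have hfa : f a = none := hf a (le_of_lt hlt)
        simp only [List.filterMap_cons, if_neg hak, hfa, List.mem_cons]
        rw [ih hpw]
        have hne : ¬ k = a := fun h => hak h.symm
        simp [hne]
      · have hknt : k ∉ t := fun h => absurd (hat k h) (by omega)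
        have hknL : k ∉ a :: t := by
          intro h
          rcases List.mem_cons.mp h with h | h
          · exact hak h.symm
          · exact hknt h
        rw [if_neg hknL, List.nil_append]
        apply List.filterMap_congr
        intro q hq
        rcases List.mem_cons.mp hq with h | h
        · subst h; exact if_neg hak
        · exact if_neg (fun he : q = k => hknt (he ▸ h))

/-- Core: A's scan over the alignment equals looking up the (strictly increasing) requested
positions in B's table. -/
theorem gaModel_eq_filterMap (chars : List Char) (m s : Int) (L : List Int)
    (hL : L.Pairwise (· < ·)) :
    gaModel L chars m s = L.filterMap (lk (bdModel chars m s)) := by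
  induction chars generalizing m s with
  | nil =>
    simp [gaModel, bdModel, lk]
  | cons c t ih =>
    simp only [gaModel, bdModel]
    by_cases hc : c ≠ '-'
    · rw [if_pos hc, if_pos hc]
      have hlk : ∀ p, lk ((s + 1, m) :: bdModel t (m + 1) (s + 1)) p =
          if p = s + 1 then some m else lk (bdModel t (m + 1) (s + 1)) p := fun p => rfl
      rw [List.filterMap_congr (fun p _ => hlk p),
        filterMap_cons_key L (lk (bdModel t (m + 1) (s + 1))) (s + 1) m hL
          (fun p hp => lk_bdModel_of_le t (m + 1) (s + 1) p hp),
        ← ih (m + 1) (s + 1)]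
      by_cases hin : (s + 1) ∈ L
      · rw [if_pos hin, if_pos hin]; rfl
      · rw [if_neg hin, if_neg hin]; rfl
    · rw [if_neg hc, if_neg hc]
      exact ih (m + 1) s

-- ===== VERDICT (by name: the statement is the Claim_ definition above) =====
theorem get_msa_index_spec : Claim_equal_get_msa_index := by
  intro ref_seq ref_seq_pos _
  unfold Spec_get_msa_index get_msa_index get_msa_index_alt
  simp only []
  set L := PySem.List.sorted (PySem.Set.ofList ref_seq_pos) (fun x => x) false with hLdef
  have hL : L.Pairwise (· < ·) := by
    rw [hLdef]; exact PySem.List.sorted_ofList_pairwise_lt ref_seq_pos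
  have hmem : ∀ p : Int, PySem.Set.contains (PySem.Set.ofList ref_seq_pos) p = true ↔ p ∈ L := by
    intro p
    rw [PySem.Set.contains_iff, hLdef, PySem.List.mem_sorted]
  rw [foldA_eq_gaModel (PySem.Set.ofList ref_seq_pos) L hmem ref_seq.toList 1 0 [],
    foldB_collect, List.nil_append, List.nil_append,
    List.filterMap_congr (fun p _ => foldB_get?_eq_lk ref_seq.toList 1 0 PySem.Dict.empty p),
    gaModel_eq_filterMap ref_seq.toList 1 0 L hL]
  apply List.filterMap_congr
  intro p _
  cases lk (bdModel ref_seq.toList 1 0) p with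
  | some v => rfl
  | none => simp [PySem.Dict.get?_empty]
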